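-- pv_equiv track=rewrite | github.com/tritran14/ai_mem | src/ai_mem/server/infrastructure/utils/llm_response_parser.py | clean_llm_response
-- ===== SOURCE A (Python) =====
-- def clean_llm_response(response: str) -> str:
--     """
--     Clean LLM response by removing common prefixes and suffixes.
--
--     Args:
--         response: Raw response from LLM
--
--     Returns:
--         Cleaned response string
--     """
--     if not response:
--         return ""
--
--     # Remove common prefixes
--     prefixes = [
--         "Output:",
--         "Result:",
--         "Here is the output:",
--         "Here's the result:",
--         "The output is:",
--     ]
--
--     cleaned = response.strip()
--     for prefix in prefixes:
--         if cleaned.lower().startswith(prefix.lower()):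
--             cleaned = cleaned[len(prefix):].strip()
--             break
--
--     # Remove common suffixes
--     suffixes = [
--         "Done!",
--         "Complete!",
--         "Finished!",
--     ]
--
--     for suffix in suffixes:
--         if cleaned.lower().endswith(suffix.lower()):
--             cleaned = cleaned[:-len(suffix)].strip()
--             break
--
--     return cleaned
-- ===== SOURCE B (Python) =====
-- _PREFIX_SET = frozenset({
--     "output:", "result:", "here is the output:",
--     "here's the result:", "the output is:",
-- })
-- _SUFFIXES_BY_LEN = {5: frozenset({"done!"}), 9: frozenset({"complete!", "finished!"})}
--
--
-- def clean_llm_response(response: str) -> str: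
--     # Every known prefix ends at its only ':', so one find(':') plus a set
--     # lookup of the slice replaces the scan over candidate prefixes; the
--     # suffixes are indexed by their length, so two fixed-length tail slices
--     # with set lookups replace the endswith scan.
--     s = response.strip()
--     low = s.lower()
--     i = low.find(":")
--     if low[: i + 1] in _PREFIX_SET:
--         s = s[i + 1:].strip()
--         low = s.lower()
--     for k, tails in _SUFFIXES_BY_LEN.items():
--         if low[-k:] in tails:
--             s = s[:-k].strip()
--             break
--     return s
-- ===== Notes on version B (the rewrite author's own statement) =====
-- stated objective: alternative
-- what changed: Instead of scanning the candidate affix lists with startswith/endswith, B locates the first colon once and looks the head slice up in a precomputed set of known prefixes (each known prefix ends at its only colon), and removes suffixes via a dict indexed by suffix length whose fixed-length tail slices are looked up in sets.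
import Mathlib
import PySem

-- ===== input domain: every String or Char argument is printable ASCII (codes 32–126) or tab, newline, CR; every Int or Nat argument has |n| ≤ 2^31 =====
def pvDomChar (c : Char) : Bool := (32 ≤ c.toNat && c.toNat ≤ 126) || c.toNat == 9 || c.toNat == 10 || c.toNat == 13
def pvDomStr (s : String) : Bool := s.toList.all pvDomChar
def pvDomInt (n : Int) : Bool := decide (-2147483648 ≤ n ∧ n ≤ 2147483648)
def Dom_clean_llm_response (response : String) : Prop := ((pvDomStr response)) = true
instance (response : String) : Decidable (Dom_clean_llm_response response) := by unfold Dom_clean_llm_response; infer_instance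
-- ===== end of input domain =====

-- B replaces A's scans over the candidate affix lists by indexed lookups: one find(':') plus a
-- set lookup of the head slice for the prefixes, and length-keyed tail slices with set lookups
-- for the suffixes (alternative decomposition, same cost).

-- ===== PORT A =====
-- the 'for prefix in prefixes: … break' loop of A
def aPrefLoop : List String → String → String
  | [], c => c
  | p :: ps, c =>
    if PySem.Str.startswith (PySem.Str.lower c) (PySem.Str.lower p) then
      PySem.Str.strip (PySem.Str.slice c (some (PySem.Str.len p)) none)
    else aPrefLoop ps c

-- the 'for suffix in suffixes: … break' loop of A
def aSufLoop : List String → String → String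
  | [], c => c
  | q :: qs, c =>
    if PySem.Str.endswith (PySem.Str.lower c) (PySem.Str.lower q) then
      PySem.Str.strip (PySem.Str.slice c none (some (-(PySem.Str.len q))))
    else aSufLoop qs c

def clean_llm_response (response : String) : String :=
  if response == "" then ""
  else
    let cleaned := PySem.Str.strip response
    let cleaned := aPrefLoop
      ["Output:", "Result:", "Here is the output:", "Here's the result:", "The output is:"] cleaned
    aSufLoop ["Done!", "Complete!", "Finished!"] cleaned

-- ===== PORT B =====
-- _PREFIX_SET
def bPrefixSet : PySem.Set String :=
  PySem.Set.ofList
    ["output:", "result:", "here is the output:", "here's the result:", "the output is:"]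

-- _SUFFIXES_BY_LEN
def bSuffixesByLen : PySem.Dict Int (PySem.Set String) :=
  ((PySem.Dict.empty).insert 5 (PySem.Set.ofList ["done!"])).insert 9
    (PySem.Set.ofList ["complete!", "finished!"])

-- 'for k, tails in _SUFFIXES_BY_LEN.items(): … break'
def bSufLoop : List (Int × PySem.Set String) → String → String → String
  | [], s, _ => s
  | (k, tails) :: rest, s, low =>
    if PySem.Set.contains tails (PySem.Str.slice low (some (-k)) none) then
      PySem.Str.strip (PySem.Str.slice s none (some (-k)))
    else bSufLoop rest s low

def clean_llm_response_alt (response : String) : String :=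
  let s := PySem.Str.strip response
  let low := PySem.Str.lower s
  let i := PySem.Str.find low ":"
  let sl :=
    if PySem.Set.contains bPrefixSet (PySem.Str.slice low none (some (i + 1))) then
      let s' := PySem.Str.strip (PySem.Str.slice s (some (i + 1)) none)
      (s', PySem.Str.lower s')
    else (s, low)
  bSufLoop bSuffixesByLen.items sl.1 sl.2

-- ===== PRECONDITION & SPEC =====
def Spec_clean_llm_response (response : String) (out : String) : Prop := out = clean_llm_response_alt response
instance (response : String) (out : String) : Decidable (Spec_clean_llm_response response out) := by unfold Spec_clean_llm_response; infer_instance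

-- ===== CLAIM (what is proved, stated in full; the proofs are below) =====
def Claim_equal_clean_llm_response : Prop := ∀ (response : String), Dom_clean_llm_response response → Spec_clean_llm_response response (clean_llm_response response)

-- ===== LEMMAS AND PROOFS =====

lemma drop_sub_eq_iff (s p : List Char) :
    s.drop (s.length - p.length) = p ↔ p <:+ s := by
  constructor
  · intro h; exact h ▸ List.drop_suffix _ _
  · intro h; exact (List.suffix_iff_eq_drop.mp h).symm

lemma slice_beq_endswith (c p : String) (k : Nat) (hk : 0 < k) (hlen : p.toList.length = k) :
    (PySem.Str.slice c (some (-(k : Int))) none == p) = PySem.Chars.endswith c.toList p.toList := by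
  rw [Bool.eq_iff_iff, beq_iff_eq, ← String.toList_inj, PySem.Chars.endswith_iff]
  have hs : (PySem.Str.slice c (some (-(k : Int))) none).toList
      = c.toList.drop (c.toList.length - k) := by
    simp [PySem.List.slice_from_neg_natCast _ k hk]
  rw [hs, ← hlen, drop_sub_eq_iff]

lemma find_colon_of_split (q t : List Char) (hq : (':' : Char) ∉ q) :
    PySem.Chars.find (q ++ ':' :: t) [':'] = (q.length : Int) := by
  have hin : ([':'] : List Char) <:+: q ++ ':' :: t := ⟨q, t, by simp⟩
  have hnn : 0 ≤ PySem.Chars.find (q ++ ':' :: t) [':'] :=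
    (PySem.Chars.find_nonneg_iff _ _).mpr hin
  obtain ⟨hpre, hmin⟩ := PySem.Chars.find_spec (s := q ++ ':' :: t) (sub := [':']) hnn
  set n := (PySem.Chars.find (q ++ ':' :: t) [':']).toNat with hn
  have hle : n ≤ q.length := by
    by_contra hlt
    exact hmin q.length (by omega) (by simp)
  have hge : q.length ≤ n := by
    by_contra hlt
    obtain ⟨u, hu⟩ := hpre
    have hget : (q ++ ':' :: t)[n]? = some ':' := by
      have h0 : (List.drop n (q ++ ':' :: t))[0]? = (q ++ ':' :: t)[n + 0]? :=
        List.getElem?_drop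
      rw [← hu] at h0
      simpa using h0.symm
    rw [List.getElem?_append_left (by omega)] at hget
    exact hq (List.mem_of_getElem? hget)
  omega

lemma pref_case (c : String) (q t : List Char) (hq : (':' : Char) ∉ q)
    (h : PySem.Chars.lower c.toList = q ++ ':' :: t) :
    PySem.Str.find (PySem.Str.lower c) ":" = (q.length : Int) ∧
    (PySem.Str.slice (PySem.Str.lower c) none (some ((q.length : Int) + 1))).toList
      = q ++ [':'] := by
  constructor
  · have : (":" : String).toList = [':'] := rfl
    simp [h, this, find_colon_of_split q t hq]
  · have h1 : ((q.length : Int) + 1) = ((q.length + 1 : Nat) : Int) := by push_cast; ring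
    simp only [PySem.Str.slice, PySem.Chars.slice_eq_listSlice, PySem.Str.toList_lower, h]
    rw [PySem.List.slice_to _ (by positivity)]
    have h2 : ((q.length : Int) + 1).toNat = q.length + 1 := by omega
    rw [h2]
    simp [List.take_append]

lemma slice_to_prefix (s : String) (b : Int) (hb : 0 ≤ b) :
    (PySem.Str.slice s none (some b)).toList <+: s.toList := by
  simp only [PySem.Str.slice, PySem.Chars.slice_eq_listSlice, String.toList_ofList]
  rw [PySem.List.slice_to _ hb]
  exact List.take_prefix _ _

-- one matched-prefix branch, uniformly: head = everything before the first ':' in lowered c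
lemma pref_hit (c : String) (pl pq : String) (t : List Char)
    (hsplit : pl.toList = pq.toList ++ [':']) (hq : (':' : Char) ∉ pq.toList)
    (hpre : pl.toList ++ t = PySem.Chars.lower c.toList) :
    PySem.Str.find (PySem.Str.lower c) ":" = (pq.toList.length : Int) ∧
    PySem.Str.slice (PySem.Str.lower c) none (some ((pq.toList.length : Int) + 1)) = pl := by
  have hL : PySem.Chars.lower c.toList = pq.toList ++ ':' :: t := by
    rw [← hpre, hsplit, List.append_assoc]; rfl
  obtain ⟨hf, hs⟩ := pref_case c pq.toList t hq hL
  exact ⟨hf, String.toList_inj.mp (by rw [hs, hsplit])⟩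

lemma pref_stage (c : String) :
    aPrefLoop ["Output:", "Result:", "Here is the output:", "Here's the result:", "The output is:"] c =
      (if PySem.Set.contains bPrefixSet
          (PySem.Str.slice (PySem.Str.lower c) none (some (PySem.Str.find (PySem.Str.lower c) ":" + 1)))
        then PySem.Str.strip (PySem.Str.slice c (some (PySem.Str.find (PySem.Str.lower c) ":" + 1)) none)
        else c) := by
  have e1 : PySem.Str.lower "Output:" = "output:" := by decide
  have e2 : PySem.Str.lower "Result:" = "result:" := by decide
  have e3 : PySem.Str.lower "Here is the output:" = "here is the output:" := by decide
  have e4 : PySem.Str.lower "Here's the result:" = "here's the result:" := by decide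
  have e5 : PySem.Str.lower "The output is:" = "the output is:" := by decide
  simp only [aPrefLoop, e1, e2, e3, e4, e5]
  by_cases h1 : PySem.Str.startswith (PySem.Str.lower c) "output:" = true
  · obtain ⟨t, ht⟩ := (PySem.Chars.startswith_iff _ _).mp (by simpa using h1)
    obtain ⟨hf, hs⟩ := pref_hit c "output:" "output" t (by decide) (by decide) (by simpa using ht)
    rw [hf, hs, if_pos h1, if_pos (by decide : PySem.Set.contains bPrefixSet "output:" = true)]
    rw [show ((("output".toList.length : Int)) + 1) = PySem.Str.len "Output:" by decide]
  · by_cases h2 : PySem.Str.startswith (PySem.Str.lower c) "result:" = true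
    · obtain ⟨t, ht⟩ := (PySem.Chars.startswith_iff _ _).mp (by simpa using h2)
      obtain ⟨hf, hs⟩ := pref_hit c "result:" "result" t (by decide) (by decide) (by simpa using ht)
      rw [hf, hs, if_neg h1, if_pos h2, if_pos (by decide : PySem.Set.contains bPrefixSet "result:" = true)]
      rw [show ((("result".toList.length : Int)) + 1) = PySem.Str.len "Result:" by decide]
    · by_cases h3 : PySem.Str.startswith (PySem.Str.lower c) "here is the output:" = true
      · obtain ⟨t, ht⟩ := (PySem.Chars.startswith_iff _ _).mp (by simpa using h3)
        obtain ⟨hf, hs⟩ := pref_hit c "here is the output:" "here is the output" t (by decide) (by decide) (by simpa using ht)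
        rw [hf, hs, if_neg h1, if_neg h2, if_pos h3,
          if_pos (by decide : PySem.Set.contains bPrefixSet "here is the output:" = true)]
        rw [show ((("here is the output".toList.length : Int)) + 1) = PySem.Str.len "Here is the output:" by decide]
      · by_cases h4 : PySem.Str.startswith (PySem.Str.lower c) "here's the result:" = true
        · obtain ⟨t, ht⟩ := (PySem.Chars.startswith_iff _ _).mp (by simpa using h4)
          obtain ⟨hf, hs⟩ := pref_hit c "here's the result:" "here's the result" t (by decide) (by decide) (by simpa using ht)
          rw [hf, hs, if_neg h1, if_neg h2, if_neg h3, if_pos h4,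
            if_pos (by decide : PySem.Set.contains bPrefixSet "here's the result:" = true)]
          rw [show ((("here's the result".toList.length : Int)) + 1) = PySem.Str.len "Here's the result:" by decide]
        · by_cases h5 : PySem.Str.startswith (PySem.Str.lower c) "the output is:" = true
          · obtain ⟨t, ht⟩ := (PySem.Chars.startswith_iff _ _).mp (by simpa using h5)
            obtain ⟨hf, hs⟩ := pref_hit c "the output is:" "the output is" t (by decide) (by decide) (by simpa using ht)
            rw [hf, hs, if_neg h1, if_neg h2, if_neg h3, if_neg h4, if_pos h5,
              if_pos (by decide : PySem.Set.contains bPrefixSet "the output is:" = true)]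
            rw [show ((("the output is".toList.length : Int)) + 1) = PySem.Str.len "The output is:" by decide]
          · have hcont : PySem.Set.contains bPrefixSet
                (PySem.Str.slice (PySem.Str.lower c) none (some (PySem.Str.find (PySem.Str.lower c) ":" + 1))) = false := by
              by_contra hc'
              have hc2 := (PySem.Set.contains_iff _ _).mp (Bool.of_not_eq_false hc')
              have hx : (PySem.Str.slice (PySem.Str.lower c) none
                  (some (PySem.Str.find (PySem.Str.lower c) ":" + 1))).toList <+: (PySem.Str.lower c).toList := by
                apply slice_to_prefix
                have := PySem.Chars.neg_one_le_find ((PySem.Str.lower c).toList) ((":" : String).toList)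
                simp only [PySem.Str.find_eq] at *
                omega
              simp only [bPrefixSet, PySem.Set.mem_ofList, List.mem_cons,
                List.not_mem_nil, or_false] at hc2
              rcases hc2 with hq | hq | hq | hq | hq <;>
                · rw [hq] at hx
                  first
                  | exact h1 ((by simpa using (PySem.Chars.startswith_iff _ _).mpr hx))
                  | exact h2 ((by simpa using (PySem.Chars.startswith_iff _ _).mpr hx))
                  | exact h3 ((by simpa using (PySem.Chars.startswith_iff _ _).mpr hx))
                  | exact h4 ((by simpa using (PySem.Chars.startswith_iff _ _).mpr hx))
                  | exact h5 ((by simpa using (PySem.Chars.startswith_iff _ _).mpr hx))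
            rw [if_neg h1, if_neg h2, if_neg h3, if_neg h4, if_neg h5, hcont]
            simp

lemma contains_one (p x : String) :
    PySem.Set.contains (PySem.Set.ofList [p]) x = (x == p) := by
  rw [Bool.eq_iff_iff, PySem.Set.contains_iff]
  simp [PySem.Set.mem_ofList]

lemma contains_two (p q x : String) :
    PySem.Set.contains (PySem.Set.ofList [p, q]) x = ((x == p) || (x == q)) := by
  rw [Bool.eq_iff_iff, PySem.Set.contains_iff]
  simp [PySem.Set.mem_ofList]

lemma ite_orchain {α : Type} (p q r : Prop) [Decidable p] [Decidable q] [Decidable r]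
    (a b cc : α) :
    (if p then a else if q then b else if r then b else cc) =
    (if p then a else if q ∨ r then b else cc) := by
  by_cases hp : p <;> by_cases hq : q <;> by_cases hr : r <;> simp [hp, hq, hr]

lemma suf_stage (c : String) :
    aSufLoop ["Done!", "Complete!", "Finished!"] c =
      bSufLoop [(5, PySem.Set.ofList ["done!"]), (9, PySem.Set.ofList ["complete!", "finished!"])]
        c (PySem.Str.lower c) := by
  have e1 : PySem.Str.lower "Done!" = "done!" := by decide
  have e2 : PySem.Str.lower "Complete!" = "complete!" := by decide
  have e3 : PySem.Str.lower "Finished!" = "finished!" := by decide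
  have c5 : (-(5 : Int)) = -((5 : Nat) : Int) := by norm_num
  have c9 : (-(9 : Int)) = -((9 : Nat) : Int) := by norm_num
  have k1 := slice_beq_endswith (PySem.Str.lower c) "done!" 5 (by omega) (by decide)
  have k2 := slice_beq_endswith (PySem.Str.lower c) "complete!" 9 (by omega) (by decide)
  have k3 := slice_beq_endswith (PySem.Str.lower c) "finished!" 9 (by omega) (by decide)
  have l1 : -(PySem.Str.len "Done!") = -((5 : Nat) : Int) := by decide
  have l2 : -(PySem.Str.len "Complete!") = -((9 : Nat) : Int) := by decide
  have l3 : -(PySem.Str.len "Finished!") = -((9 : Nat) : Int) := by decide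
  simp only [aSufLoop, bSufLoop, e1, e2, e3, c5, c9, contains_one, contains_two, k1, k2, k3,
    l1, l2, l3, PySem.Str.endswith_eq, Bool.or_eq_true]
  exact ite_orchain _ _ _ _ _ _

-- ===== VERDICT (by name: the statement is the Claim_ definition above) =====
theorem clean_llm_response_spec : Claim_equal_clean_llm_response := by
  intro response _
  unfold Spec_clean_llm_response clean_llm_response clean_llm_response_alt
  by_cases h : response = ""
  · subst h; decide
  · have hitems : bSuffixesByLen.items =
        [(5, PySem.Set.ofList ["done!"]), (9, PySem.Set.ofList ["complete!", "finished!"])] := by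
      decide
    simp only [beq_iff_eq, if_neg h, hitems]
    rw [pref_stage]
    by_cases hp : PySem.Set.contains bPrefixSet
        (PySem.Str.slice (PySem.Str.lower (PySem.Str.strip response)) none
          (some (PySem.Str.find (PySem.Str.lower (PySem.Str.strip response)) ":" + 1))) = true
    · rw [if_pos hp, if_pos hp]
      exact suf_stage _
    · rw [if_neg hp, if_neg hp]
      exact suf_stage _
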